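-- pv_equiv track=rewrite | github.com/OpenDCAI/DataFlow-Agent | dataflow_agent/web_collection/utils/web_tools.py | extract_urls_from_search_results
-- ===== SOURCE A (Python) =====
-- from typing import Dict, List, Any, Optional
--
-- def extract_urls_from_search_results(search_results: str) -> List[str]:
--     """Extract URLs from search results text
--
--     Args:
--         search_results: Search results text
--
--     Returns:
--         List of unique URLs
--     """
--     urls = []
--     lines = search_results.split("\n")
--     for line in lines:
--         if line.startswith("URL:"):
--             url = line[4:].strip()
--             if url:
--                 urls.append(url)
--     return list(dict.fromkeys(urls))  # Remove duplicates
-- ===== SOURCE B (Python) =====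
-- from typing import List
--
--
-- def extract_urls_from_search_results(search_results: str) -> List[str]:
--     """Extract unique URLs by consuming a worklist of lines: each time a URL is
--     found it is emitted and every later line carrying the same URL is deleted
--     from the remaining worklist, so no set/dict dedup is ever needed."""
--     result = []
--     lines = search_results.split("\n")
--     while lines:
--         line, lines = lines[0], lines[1:]
--         if line.startswith("URL:"):
--             url = line[4:].strip()
--             if url:
--                 result.append(url)
--                 lines = [l for l in lines
--                          if not (l.startswith("URL:") and l[4:].strip() == url)]
--     return result
-- ===== Notes on version B (the rewrite author's own statement) =====
-- stated objective: alternative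
-- what changed: B dedups by deletion instead of by lookup: it consumes a worklist of lines and, whenever a URL is emitted, filters every later line with the same URL out of the remaining worklist, so there is no collect-then-dedup phase and no set/dict at all.
import Mathlib
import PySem

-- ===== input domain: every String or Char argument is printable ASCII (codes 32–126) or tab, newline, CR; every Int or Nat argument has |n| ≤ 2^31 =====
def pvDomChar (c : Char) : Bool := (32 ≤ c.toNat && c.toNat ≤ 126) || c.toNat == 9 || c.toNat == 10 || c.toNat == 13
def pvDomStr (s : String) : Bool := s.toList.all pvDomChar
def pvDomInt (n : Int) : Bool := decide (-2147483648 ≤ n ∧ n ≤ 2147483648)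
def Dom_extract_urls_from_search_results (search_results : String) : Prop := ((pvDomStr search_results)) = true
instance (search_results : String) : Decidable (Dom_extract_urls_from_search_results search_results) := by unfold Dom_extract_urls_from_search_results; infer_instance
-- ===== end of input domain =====

-- B dedups by deletion: each emitted URL removes its later duplicates from the remaining
-- worklist of lines, replacing A's collect-then-dedup; objective: alternative.

-- ===== PORT A =====
-- step of A's loop: append the stripped URL when the line matches and it is non-empty
def pvAStep (urls : List String) (line : String) : List String :=
  if PySem.Str.startswith line "URL:" then
    let url := PySem.Str.strip (PySem.Str.slice line (some 4) none)
    if url ≠ "" then urls ++ [url] else urls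
  else urls

def extract_urls_from_search_results (search_results : String) : List String :=
  let lines := (PySem.Str.split? search_results "\n").getD []
  let urls := lines.foldl pvAStep []
  PySem.List.dedup urls

-- ===== PORT B =====
-- B's while loop: consume the worklist `lines`, deleting later duplicates of each emitted URL
def pvGo (lines : List String) (result : List String) : List String :=
  match lines with
  | [] => result
  | line :: rest =>
    if PySem.Str.startswith line "URL:" then
      let url := PySem.Str.strip (PySem.Str.slice line (some 4) none)
      if url ≠ "" then
        pvGo (rest.filter (fun l =>
          !(PySem.Str.startswith l "URL:" &&
            (PySem.Str.strip (PySem.Str.slice l (some 4) none) == url)))) (result ++ [url])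
      else pvGo rest result
    else pvGo rest result
termination_by lines.length
decreasing_by
  · simp only [List.length_unattach, List.length_cons]
    exact Nat.lt_succ_of_le (le_trans (List.length_filter_le _ _) (by simp))
  · simp only [List.length_cons]; omega
  · simp only [List.length_cons]; omega

def extract_urls_from_search_results_alt (search_results : String) : List String :=
  pvGo ((PySem.Str.split? search_results "\n").getD []) []

-- ===== PRECONDITION & SPEC =====
def Spec_extract_urls_from_search_results (search_results : String) (out : List String) : Prop := out = extract_urls_from_search_results_alt search_results
instance (search_results : String) (out : List String) : Decidable (Spec_extract_urls_from_search_results search_results out) := by unfold Spec_extract_urls_from_search_results; infer_instance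

-- ===== CLAIM =====
def Claim_equal_extract_urls_from_search_results : Prop := ∀ (search_results : String), Dom_extract_urls_from_search_results search_results → Spec_extract_urls_from_search_results search_results (extract_urls_from_search_results search_results)

-- ===== LEMMAS AND PROOFS =====

-- the URL a line contributes, if any
def pvUrlOf? (line : String) : Option String :=
  if PySem.Str.startswith line "URL:" then
    let url := PySem.Str.strip (PySem.Str.slice line (some 4) none)
    if url = "" then none else some url
  else none

-- A's fold collects exactly the filterMap of pvUrlOf?
theorem pv_foldA (lines : List String) (acc : List String) :
    lines.foldl pvAStep acc = acc ++ lines.filterMap pvUrlOf? := by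
  induction lines generalizing acc with
  | nil => simp
  | cons l rest ih =>
    by_cases hs : PySem.Chars.startswith l.toList ['U','R','L',':'] = true
    · by_cases he : PySem.Str.strip (PySem.Str.slice l (some 4) none) = ""
      · simp [pvAStep, pvUrlOf?, hs, he, ih]
      · simp [pvAStep, pvUrlOf?, hs, he, ih]
    · simp [pvAStep, pvUrlOf?, hs, ih]

-- filtering already-present elements does not change a Set.add fold
theorem pv_foldl_add_filter_mem (xs : List String) (s : PySem.Set String) (u : String)
    (hu : u ∈ s) :
    xs.foldl PySem.Set.add s = (xs.filter (fun x => x ≠ u)).foldl PySem.Set.add s := by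
  induction xs generalizing s with
  | nil => simp
  | cons x t ih =>
    by_cases hx : x = u
    · subst hx
      have : PySem.Set.add s x = s := by simp [PySem.Set.add, hu]
      simp [this, ih _ hu]
    · have hu' : u ∈ PySem.Set.add s x := by
        simp [PySem.Set.add]; split <;> simp [hu]
      simp [hx, ih _ hu']

-- a prefix not touched by the fold stays a prefix
theorem pv_foldl_add_prefix (xs : List String) (a b : List String)
    (ha : ∀ y ∈ xs, y ∉ a) :
    xs.foldl PySem.Set.add (a ++ b) = a ++ xs.foldl PySem.Set.add b := by
  induction xs generalizing b with
  | nil => simp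
  | cons x t ih =>
    have hxa : x ∉ a := ha x (by simp)
    have hc : PySem.Set.add (a ++ b) x = a ++ PySem.Set.add b x := by
      simp [PySem.Set.add, List.contains_eq_mem, hxa]
      split <;> simp
    simp only [List.foldl_cons, hc]
    exact ih _ (fun y hy => ha y (by simp [hy]))

-- dedup of a cons: keep the head, dedup the tail with the head removed
theorem pv_dedup_cons (u : String) (xs : List String) :
    PySem.List.dedup (u :: xs) = u :: PySem.List.dedup (xs.filter (fun x => x ≠ u)) := by
  simp only [PySem.List.dedup_eq_ofList, PySem.Set.ofList_eq_foldl, List.foldl_cons]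
  have h0 : PySem.Set.add ([] : PySem.Set String) u = [u] := by simp [PySem.Set.add]
  rw [h0, pv_foldl_add_filter_mem xs [u] u (by simp)]
  have : ([u] : List String) = [u] ++ [] := by simp
  rw [this, pv_foldl_add_prefix]
  · simp
  · intro y hy; simp at hy; simp [hy.2]

-- B's deletion filter acts on contributions as removing the emitted URL
theorem pv_filter_filterMap (rest : List String) (u : String) (hu : u ≠ "") :
    (rest.filter (fun l =>
        !(PySem.Str.startswith l "URL:" &&
          (PySem.Str.strip (PySem.Str.slice l (some 4) none) == u)))).filterMap pvUrlOf?
      = (rest.filterMap pvUrlOf?).filter (fun x => x ≠ u) := by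
  induction rest with
  | nil => simp
  | cons l t ih =>
    cases hs : PySem.Str.startswith l "URL:" with
    | false =>
      have hP : (!(PySem.Str.startswith l "URL:" &&
          (PySem.Str.strip (PySem.Str.slice l (some 4) none) == u))) = true := by
        rw [hs]; simp
      have h0 : pvUrlOf? l = none := by
        simp only [pvUrlOf?, hs, Bool.false_eq_true, if_false]
      simp only [List.filter_cons, List.filterMap_cons, hP, h0, if_true]
      exact ih
    | true =>
      by_cases he : PySem.Str.strip (PySem.Str.slice l (some 4) none) = ""
      · -- no contribution; kept by the deletion filter since "" ≠ u
        have hP : (!(PySem.Str.startswith l "URL:" &&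
            (PySem.Str.strip (PySem.Str.slice l (some 4) none) == u))) = true := by
          rw [hs, he]; simp [Ne.symm hu]
        have h0 : pvUrlOf? l = none := by
          simp only [pvUrlOf?, hs, he, if_pos]
        simp only [List.filter_cons, List.filterMap_cons, hP, h0, if_true]
        exact ih
      · by_cases hq : PySem.Str.strip (PySem.Str.slice l (some 4) none) = u
        · -- deleted; its contribution u is dropped by the ≠-filter
          have hP : (!(PySem.Str.startswith l "URL:" &&
              (PySem.Str.strip (PySem.Str.slice l (some 4) none) == u))) = false := by
            rw [hs, hq]; simp
          have hsome : pvUrlOf? l = some u := by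
            simp only [pvUrlOf?, hs, if_true]
            rw [if_neg he, hq]
          have hd : (decide (u ≠ u)) = false := by simp
          simp only [List.filter_cons, List.filterMap_cons, hP, hsome, Bool.false_eq_true,
            if_false, hd]
          exact ih
        · -- kept; its contribution passes the ≠-filter
          have hP : (!(PySem.Str.startswith l "URL:" &&
              (PySem.Str.strip (PySem.Str.slice l (some 4) none) == u))) = true := by
            rw [hs]; simp [hq]
          have hsome : pvUrlOf? l = some (PySem.Str.strip (PySem.Str.slice l (some 4) none)) := by
            simp only [pvUrlOf?, hs, if_true]
            rw [if_neg he]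
          have hd : (decide (PySem.Str.strip (PySem.Str.slice l (some 4) none) ≠ u)) = true := by
            simp [hq]
          simp only [List.filter_cons, List.filterMap_cons, hP, hsome, if_true,
            hd]
          rw [ih]

-- the deletion loop computes dedup of the contributions (strong induction on the worklist length)
theorem pv_go_aux (n : Nat) : ∀ (lines : List String), lines.length ≤ n → ∀ (result : List String),
    pvGo lines result = result ++ PySem.List.dedup (lines.filterMap pvUrlOf?) := by
  induction n with
  | zero =>
    intro lines h result
    have hnil : lines = [] := List.eq_nil_of_length_eq_zero (Nat.le_zero.mp h)
    subst hnil; simp [pvGo]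
  | succ n ih =>
    intro lines h result
    match lines with
    | [] => simp [pvGo]
    | line :: rest =>
      have hr : rest.length ≤ n := by simp only [List.length_cons] at h; omega
      rw [pvGo]
      by_cases hs : PySem.Chars.startswith line.toList ['U','R','L',':'] = true
      · by_cases he : PySem.Str.strip (PySem.Str.slice line (some 4) none) = ""
        · simp [pvUrlOf?, hs, he, ih rest hr]
        · have hsS : PySem.Str.startswith line "URL:" = true := by simpa using hs
          have hsome : pvUrlOf? line = some (PySem.Str.strip (PySem.Str.slice line (some 4) none)) := by
            simp only [pvUrlOf?, hsS, if_true]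
            rw [if_neg he]
          have hf : (rest.filter (fun l =>
              !(PySem.Str.startswith l "URL:" &&
                (PySem.Str.strip (PySem.Str.slice l (some 4) none) ==
                  PySem.Str.strip (PySem.Str.slice line (some 4) none))))).length ≤ n :=
            le_trans (List.length_filter_le _ _) hr
          have hstep := ih _ hf (result ++ [PySem.Str.strip (PySem.Str.slice line (some 4) none)])
          rw [pv_filter_filterMap rest _ he] at hstep
          have hd := pv_dedup_cons (PySem.Str.strip (PySem.Str.slice line (some 4) none))
            (rest.filterMap pvUrlOf?)
          simp at hstep hd
          simp [hs, he, hsome, hstep, hd]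
      · simp [pvUrlOf?, hs, ih rest hr]

theorem pv_go (lines result : List String) :
    pvGo lines result = result ++ PySem.List.dedup (lines.filterMap pvUrlOf?) :=
  pv_go_aux lines.length lines le_rfl result

-- ===== VERDICT =====
theorem extract_urls_from_search_results_spec : Claim_equal_extract_urls_from_search_results := by
  intro s _
  unfold Spec_extract_urls_from_search_results
  show PySem.List.dedup (((PySem.Str.split? s "\n").getD []).foldl pvAStep []) =
    extract_urls_from_search_results_alt s
  unfold extract_urls_from_search_results_alt
  rw [pv_foldA, pv_go]
  simp
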